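-- pv_equiv track=rewrite | github.com/jmachanickal/python-challenge | PyBank_solved_main.py | greatest_Increase
-- ===== SOURCE A (Python) =====
-- def greatest_Increase(mo_diff):
--  	# local variable to store maximum increase
-- 	max_change= 0
-- 	diction = {}
-- 	# Set local maximum profit change using the first row
-- 	max_change = mo_diff[0][1]
--
-- 	# Loop through the multi-dimensional list to find greatest increase and its respective month
-- 	for row in mo_diff:
-- 		if row[1] > max_change:
-- 			# Storing the temporary dictionary
-- 			diction = {row[0]:row[1]}
--
-- 			# Replace the local variables
-- 			max_change = row[1]
--
-- 	return diction
-- ===== SOURCE B (Python) =====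
-- def greatest_Increase(mo_diff):
--     first = mo_diff[0][1]
--     max_val = max(r[1] for r in mo_diff)
--     if max_val > first:
--         for row in mo_diff:
--             if row[1] == max_val:
--                 return {row[0]: row[1]}
--     return {}
-- ===== Notes on version B (the rewrite author's own statement) =====
-- stated objective: alternative
-- what changed: Replaces A's single running-max accumulator loop (which rebuilds the dict at every strict increase) with a two-pass max-then-locate decomposition: compute the maximum value, then return the first row carrying it (or {} when the maximum does not strictly exceed the first row's value).
import Mathlib
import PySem

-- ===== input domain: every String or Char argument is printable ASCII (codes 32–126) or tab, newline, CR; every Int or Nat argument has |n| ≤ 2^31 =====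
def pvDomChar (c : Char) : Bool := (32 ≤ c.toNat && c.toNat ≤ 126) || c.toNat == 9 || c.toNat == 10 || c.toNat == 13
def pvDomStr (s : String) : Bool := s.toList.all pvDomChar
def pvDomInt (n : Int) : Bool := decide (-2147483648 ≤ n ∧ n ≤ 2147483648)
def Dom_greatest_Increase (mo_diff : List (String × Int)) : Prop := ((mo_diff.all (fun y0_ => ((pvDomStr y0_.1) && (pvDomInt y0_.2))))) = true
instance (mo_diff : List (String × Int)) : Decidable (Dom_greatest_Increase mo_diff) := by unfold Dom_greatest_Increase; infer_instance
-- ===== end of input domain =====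

-- B replaces A's running-max accumulator loop by a max-then-locate two-pass decomposition (alternative, same cost).
-- ===== PORT A =====
-- A: running maximum seeded with the first row's value; the dict is rebuilt on every strict increase.
def greatest_Increase (mo_diff : List (String × Int)) : List (String × Int) :=
  match PySem.List.pyGet? mo_diff 0 with
  | none => []  -- IndexError on empty input; excluded by Pre_
  | some h =>
    (mo_diff.foldl
      (fun (s : Int × List (String × Int)) row =>
        if row.2 > s.1 then (row.2, [(row.1, row.2)]) else s)
      (h.2, [])).2

-- ===== PORT B =====
-- B: compute the maximum value in one pass; if it strictly exceeds the first value, return the first row carrying it.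
def greatest_Increase_alt (mo_diff : List (String × Int)) : List (String × Int) :=
  match PySem.List.pyGet? mo_diff 0 with
  | none => []  -- IndexError on empty input; excluded by Pre_
  | some h =>
    match PySem.List.max? (mo_diff.map (fun r => r.2)) (fun y => y) with
    | none => []
    | some maxv =>
      if maxv > h.2 then
        match mo_diff.find? (fun row => row.2 == maxv) with
        | some row => [(row.1, row.2)]
        | none => []
      else []

-- ===== PRECONDITION & SPEC =====
-- A raises IndexError (mo_diff[0]) on the empty list; that is the only raising input.
def Pre_greatest_Increase (mo_diff : List (String × Int)) : Prop := mo_diff ≠ []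
instance (mo_diff : List (String × Int)) : Decidable (Pre_greatest_Increase mo_diff) := by unfold Pre_greatest_Increase; infer_instance
def pvWitness_greatest_Increase : (List (String × Int)) := [("Jan", 1), ("Feb", 5), ("Mar", 5)]
def Spec_greatest_Increase (mo_diff : List (String × Int)) (out : List (String × Int)) : Prop := out = greatest_Increase_alt mo_diff
instance (mo_diff : List (String × Int)) (out : List (String × Int)) : Decidable (Spec_greatest_Increase mo_diff out) := by unfold Spec_greatest_Increase; infer_instance

-- ===== CLAIM (what is proved, stated in full; the proofs are below) =====
def Claim_equal_greatest_Increase : Prop := ∀ (mo_diff : List (String × Int)), Dom_greatest_Increase mo_diff → Pre_greatest_Increase mo_diff → Spec_greatest_Increase mo_diff (greatest_Increase mo_diff)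

-- ===== LEMMAS AND PROOFS =====

-- the running maximum of A's loop, as a fold
def pvRunMax (l : List (String × Int)) (m : Int) : Int :=
  l.foldl (fun a r => max a r.2) m

theorem pvRunMax_le (l : List (String × Int)) (m : Int) : m ≤ pvRunMax l m := by
  induction l generalizing m with
  | nil => simp [pvRunMax]
  | cons r t ih =>
    have := ih (max m r.2)
    simp only [pvRunMax, List.foldl_cons] at *
    exact le_trans (le_max_left _ _) this

theorem pvRunMax_mem (l : List (String × Int)) (m : Int) :
    pvRunMax l m = m ∨ ∃ r ∈ l, r.2 = pvRunMax l m := by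
  induction l generalizing m with
  | nil => left; simp [pvRunMax]
  | cons r t ih =>
    have h : pvRunMax (r :: t) m = pvRunMax t (max m r.2) := by simp [pvRunMax]
    rcases ih (max m r.2) with h0 | ⟨r', hr', he⟩
    · rcases le_total r.2 m with hle | hle
      · left; rw [h, h0]; omega
      · right; exact ⟨r, List.mem_cons_self, by rw [h, h0]; omega⟩
    · right; exact ⟨r', List.mem_cons_of_mem _ hr', by rw [h]; exact he⟩

-- when the running max strictly rises, some row attains it, so find? succeeds
theorem pvFind_ne_none (t : List (String × Int)) (m : Int) (hgt : pvRunMax t m > m) :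
    t.find? (fun row => row.2 == pvRunMax t m) ≠ none := by
  intro hn
  rcases pvRunMax_mem t m with h0 | ⟨r', hr', he⟩
  · omega
  · exact absurd he (by simpa using List.find?_eq_none.mp hn r' hr')

-- characterisation of A's loop state
theorem pvLoop_eq (l : List (String × Int)) (m : Int) (acc : List (String × Int)) :
    l.foldl
      (fun (s : Int × List (String × Int)) row =>
        if row.2 > s.1 then (row.2, [(row.1, row.2)]) else s)
      (m, acc)
    = (pvRunMax l m,
       if pvRunMax l m > m then
         (match l.find? (fun row => row.2 == pvRunMax l m) with
          | some row => [(row.1, row.2)]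
          | none => acc)
       else acc) := by
  induction l generalizing m acc with
  | nil => simp [pvRunMax]
  | cons r t ih =>
    have hM : pvRunMax (r :: t) m = pvRunMax t (max m r.2) := by simp [pvRunMax]
    simp only [List.foldl_cons]
    by_cases hr : r.2 > m
    · have hmx : max m r.2 = r.2 := by omega
      rw [if_pos hr, ih, hM, hmx]
      have hle := pvRunMax_le t r.2
      by_cases hgt : pvRunMax t r.2 > r.2
      · have hhd : (r.2 == pvRunMax t r.2) = false := by simp; omega
        have hfc : List.find? (fun row => row.2 == pvRunMax t r.2) (r :: t)
            = List.find? (fun row => row.2 == pvRunMax t r.2) t :=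
          List.find?_cons_of_neg (by simp [hhd])
        rw [if_pos hgt, if_pos (show pvRunMax t r.2 > m by omega), hfc]
        cases hfind : t.find? (fun row => row.2 == pvRunMax t r.2) with
        | none => exact absurd hfind (pvFind_ne_none t r.2 hgt)
        | some row => rfl
      · have heq : pvRunMax t r.2 = r.2 := by omega
        have hfc : List.find? (fun row => row.2 == r.2) (r :: t) = some r :=
          List.find?_cons_of_pos (by simp)
        rw [if_neg hgt, if_pos (show pvRunMax t r.2 > m by omega), heq, hfc]
    · have hmx : max m r.2 = m := by omega
      rw [if_neg hr, ih, hM, hmx]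
      by_cases hgt : pvRunMax t m > m
      · have hhd : (r.2 == pvRunMax t m) = false := by simp; omega
        have hfc : List.find? (fun row => row.2 == pvRunMax t m) (r :: t)
            = List.find? (fun row => row.2 == pvRunMax t m) t :=
          List.find?_cons_of_neg (by simp [hhd])
        rw [if_pos hgt, if_pos hgt, hfc]
      · rw [if_neg hgt, if_neg hgt]

-- B's max over the mapped values is A's running max
theorem pvMax_eq (h : String × Int) (t : List (String × Int)) :
    PySem.List.max? ((h :: t).map (fun r => r.2)) (fun y => y) = some (pvRunMax t h.2) := by
  rw [List.map_cons, PySem.List.max?_id_cons, pvRunMax, List.foldl_map]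

-- ===== VERDICT (by name: the statement is the Claim_ definition above) =====
theorem greatest_Increase_spec : Claim_equal_greatest_Increase := by
  intro mo_diff _ hpre
  unfold Spec_greatest_Increase greatest_Increase greatest_Increase_alt
  cases mo_diff with
  | nil => exact absurd rfl hpre
  | cons h t =>
    have hget : PySem.List.pyGet? (h :: t) 0 = some h := by
      simp [PySem.List.pyGet?, PySem.List.pyIdx?]
    rw [hget, pvMax_eq]
    dsimp only
    rw [pvLoop_eq]
    have hM : pvRunMax (h :: t) h.2 = pvRunMax t h.2 := by
      simp [pvRunMax]
    rw [hM]
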